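-- pv_equiv track=rewrite | github.com/alstjrwjd99/BaekJun | 프로그래머스/5/214292. 재밌는 레이싱 경기장 설계하기/재밌는 레이싱 경기장 설계하기.py | solution
-- ===== SOURCE A (Python) =====
-- def solution(heights):
--     heights.sort()
--     minusV = []
--     n = len(heights)
--
--     if n % 2 == 1:
--         for i in range(n // 2):
--             minusV.append(heights[i + n // 2] - heights[i])
--         minusV.append(heights[-1] - heights[n // 2])
--         minusV.sort()
--         return minusV[1]
--     else:
--         for i in range(n // 2):
--             minusV.append(heights[i + n // 2] - heights[i])
--         minusV.sort()
--         return minusV[0]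
-- ===== SOURCE B (Python) =====
-- def solution(heights):
--     heights.sort()
--     n = len(heights)
--     half = n // 2
--     lo, hi = heights[:half], heights[half:]
--     pairs = list(zip(hi, lo))
--     if n % 2 == 1:
--         pairs.append((hi[-1], hi[0]))
--     r = 1 + n % 2
--     best = []  # the r smallest differences seen so far, ascending
--     for h, l in pairs:
--         d = h - l
--         i = 0
--         while i < len(best) and best[i] <= d:
--             i += 1
--         best.insert(i, d)
--         if len(best) > r:
--             best.pop()
--     return best[r - 1]
-- ===== Notes on version B (the rewrite author's own statement) =====
-- stated objective: alternative
-- what changed: B splits the sorted list into two halves and zips them (no index arithmetic), then selects the answer in one unified pass for both parities with a size-capped sorted buffer (bounded insertion keeping the r=1+n%2 smallest differences), returning buffer[r-1], instead of A's two branches that build a difference list by indexed loop, sort it again and index it.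
import Mathlib
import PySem

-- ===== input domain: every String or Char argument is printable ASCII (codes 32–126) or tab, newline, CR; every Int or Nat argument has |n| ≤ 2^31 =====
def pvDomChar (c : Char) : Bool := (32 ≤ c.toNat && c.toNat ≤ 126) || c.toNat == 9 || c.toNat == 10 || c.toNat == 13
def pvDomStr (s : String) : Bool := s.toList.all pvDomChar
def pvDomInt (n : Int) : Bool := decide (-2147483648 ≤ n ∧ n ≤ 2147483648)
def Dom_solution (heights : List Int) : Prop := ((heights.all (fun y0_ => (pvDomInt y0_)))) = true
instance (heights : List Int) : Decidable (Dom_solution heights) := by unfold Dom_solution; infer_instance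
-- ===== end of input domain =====

-- B zips the two halves of the sorted list and keeps the r = 1 + n%2 smallest differences in a
-- size-capped sorted buffer (one unified pass), instead of A's per-parity branches that build the
-- difference list by index, sort it again and index it.
-- NOTE: the Python A sorts `heights` in place; the equivalence proved here is about the return value only.


-- ===== PORT A =====
def solution (heights : List Int) : Int :=
  let hs := PySem.List.sorted heights (fun x => x) false
  let n : Int := hs.length
  if PySem.Int.mod n 2 = 1 then
    let minusV := (PySem.List.pyRange 0 (PySem.Int.floordiv n 2) 1).foldl
      (fun acc i => acc ++ [(PySem.List.pyGet? hs (i + PySem.Int.floordiv n 2)).getD 0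
                              - (PySem.List.pyGet? hs i).getD 0]) []
    let minusV := minusV ++ [(PySem.List.pyGet? hs (-1)).getD 0
                              - (PySem.List.pyGet? hs (PySem.Int.floordiv n 2)).getD 0]
    (PySem.List.pyGet? (PySem.List.sorted minusV (fun x => x) false) 1).getD 0
  else
    let minusV := (PySem.List.pyRange 0 (PySem.Int.floordiv n 2) 1).foldl
      (fun acc i => acc ++ [(PySem.List.pyGet? hs (i + PySem.Int.floordiv n 2)).getD 0
                              - (PySem.List.pyGet? hs i).getD 0]) []
    (PySem.List.pyGet? (PySem.List.sorted minusV (fun x => x) false) 0).getD 0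

-- ===== PORT B =====
-- linear-scan insertion into an ascending buffer (Source B's while/insert)
def pvInsAsc : List Int → Int → List Int
  | [], d => [d]
  | b :: bs, d => if b ≤ d then b :: pvInsAsc bs d else d :: b :: bs

def solution_alt (heights : List Int) : Int :=
  let hs := PySem.List.sorted heights (fun x => x) false
  let n : Int := hs.length
  let half := PySem.Int.floordiv n 2
  let lo := PySem.List.slice hs none (some half)
  let hi := PySem.List.slice hs (some half) none
  let pairs := hi.zip lo
  let pairs := if PySem.Int.mod n 2 = 1 then
      pairs ++ [((PySem.List.pyGet? hi (-1)).getD 0, (PySem.List.pyGet? hi 0).getD 0)]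
    else pairs
  let r : Int := 1 + PySem.Int.mod n 2
  let best := pairs.foldl (fun best p =>
      let b := pvInsAsc best (p.1 - p.2)
      if r < (b.length : Int) then b.dropLast else b) []
  (PySem.List.pyGet? best (r - 1)).getD 0

-- ===== PRECONDITION & SPEC =====
-- Pre_ excludes exactly the inputs on which the Python A raises (IndexError for len < 2).
def Pre_solution (heights : List Int) : Prop := 2 ≤ heights.length
instance (heights : List Int) : Decidable (Pre_solution heights) := by unfold Pre_solution; infer_instance
def pvWitness_solution : List Int := [3, 1, 2]

def Spec_solution (heights : List Int) (out : Int) : Prop := out = solution_alt heights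
instance (heights : List Int) (out : Int) : Decidable (Spec_solution heights out) := by unfold Spec_solution; infer_instance

-- ===== CLAIM (what is proved, stated in full; the proofs are below) =====
def Claim_equal_solution : Prop := ∀ (heights : List Int), Dom_solution heights → Pre_solution heights → Spec_solution heights (solution heights)

-- ===== LEMMAS AND PROOFS =====

lemma pvInsAsc_perm (l : List Int) (d : Int) : (pvInsAsc l d).Perm (d :: l) := by
  induction l with
  | nil => simp [pvInsAsc]
  | cons b bs ih =>
    simp only [pvInsAsc]
    split_ifs
    · exact (ih.cons b).trans (List.Perm.swap d b bs)
    · exact List.Perm.refl _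

lemma pvInsAsc_pairwise (l : List Int) (d : Int) (h : l.Pairwise (· ≤ ·)) :
    (pvInsAsc l d).Pairwise (· ≤ ·) := by
  induction l with
  | nil => simp [pvInsAsc]
  | cons b bs ih =>
    rcases List.pairwise_cons.mp h with ⟨hb, hbs⟩
    simp only [pvInsAsc]
    split_ifs with hbd
    · refine List.pairwise_cons.mpr ⟨fun y hy => ?_, ih hbs⟩
      rcases List.mem_cons.mp ((pvInsAsc_perm bs d).mem_iff.mp hy) with hy | hy
      · exact hy ▸ hbd
      · exact hb y hy
    · refine List.pairwise_cons.mpr ⟨fun y hy => ?_, h⟩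
      rcases List.mem_cons.mp hy with hy | hy
      · subst hy; omega
      · exact le_of_lt (lt_of_lt_of_le (by omega) (hb y hy))

-- insertion commutes with truncation to the first r elements
lemma pvInsAsc_take (l : List Int) (d : Int) (r : Nat) :
    (pvInsAsc (l.take r) d).take r = (pvInsAsc l d).take r := by
  induction l generalizing r with
  | nil => simp
  | cons b bs ih =>
    cases r with
    | zero => simp
    | succ r' =>
      simp only [List.take_succ_cons, pvInsAsc]
      split_ifs
      · simp [List.take_succ_cons, ih r']
      · cases r' with
        | zero => simp
        | succ r'' =>
          simp [List.take_succ_cons, List.take_take]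

-- the bounded-buffer fold computes take r of the insertion-sort fold
lemma foldl_bounded (ds : List Int) (r : Nat) : ∀ (l : List Int),
    ds.foldl (fun best d =>
        let b := pvInsAsc best d
        if (r : Int) < (b.length : Int) then b.dropLast else b) (l.take r)
      = (ds.foldl pvInsAsc l).take r := by
  induction ds with
  | nil => intro l; simp
  | cons d ds' ih =>
    intro l
    have hstep :
        (let b := pvInsAsc (l.take r) d
         if (r : Int) < (b.length : Int) then b.dropLast else b) = (pvInsAsc l d).take r := by
      have hlen : (pvInsAsc (l.take r) d).length = min r l.length + 1 := by
        rw [(pvInsAsc_perm _ _).length_eq]; simp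
      simp only
      by_cases hl : r ≤ l.length
      · have hcond : (r : Int) < ((pvInsAsc (l.take r) d).length : Int) := by
          rw [hlen]; push_cast; omega
        rw [if_pos hcond, List.dropLast_eq_take, hlen, Nat.min_eq_left hl]
        simpa using pvInsAsc_take l d r
      · have hcond : ¬ (r : Int) < ((pvInsAsc (l.take r) d).length : Int) := by
          rw [hlen]; push_cast; omega
        rw [if_neg hcond, List.take_of_length_le (by omega : l.length ≤ r)]
        exact (List.take_of_length_le
          (by rw [(pvInsAsc_perm l d).length_eq, List.length_cons]; omega)).symm
    simp only [List.foldl_cons, hstep, ← ih (pvInsAsc l d)]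

lemma isort_perm (ds : List Int) : ∀ (l : List Int), (ds.foldl pvInsAsc l).Perm (l ++ ds) := by
  induction ds with
  | nil => intro l; simp
  | cons d ds' ih =>
    intro l
    simp only [List.foldl_cons]
    refine (ih (pvInsAsc l d)).trans ?_
    refine (((pvInsAsc_perm l d).append_right ds').trans ?_)
    simpa using (List.perm_middle (a := d) (l₁ := l) (l₂ := ds')).symm

lemma isort_pairwise (ds : List Int) : ∀ (l : List Int), l.Pairwise (· ≤ ·) →
    (ds.foldl pvInsAsc l).Pairwise (· ≤ ·) := by
  induction ds with
  | nil => intro l h; simpa using h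
  | cons d ds' ih => intro l h; exact ih _ (pvInsAsc_pairwise l d h)

-- sorted(ds) is the insertion-sort fold
lemma sorted_eq_isort (ds : List Int) :
    PySem.List.sorted ds (fun x => x) false = ds.foldl pvInsAsc [] := by
  apply PySem.List.sorted_id_eq_of_perm_of_pairwise
  · simpa using isort_perm ds []
  · exact isort_pairwise ds [] (by simp)

-- the bounded-buffer fold over pairs is take r of the sorted difference list
lemma foldl_bounded_pairs (ps : List (Int × Int)) (r : Nat) :
    ps.foldl (fun best p =>
        let b := pvInsAsc best (p.1 - p.2)
        if (r : Int) < (b.length : Int) then b.dropLast else b) []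
      = (PySem.List.sorted (ps.map (fun p => p.1 - p.2)) (fun x => x) false).take r := by
  rw [sorted_eq_isort]
  have hfb := foldl_bounded (ps.map (fun p => p.1 - p.2)) r []
  simp only [List.take_nil] at hfb
  rw [← hfb, List.foldl_map]

-- B's zipped halves produce exactly A's indexed difference list
lemma diffs_eq (hs : List Int) (h : Nat) (hh : 2 * h ≤ hs.length) :
    ((hs.drop h).zip (hs.take h)).map (fun p => p.1 - p.2)
      = (PySem.List.pyRange 0 (h : Int) 1).map
          (fun i => (PySem.List.pyGet? hs (i + (h : Int))).getD 0
                      - (PySem.List.pyGet? hs i).getD 0) := by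
  apply List.ext_getElem
  · simp [PySem.List.length_pyRange_one]; omega
  · intro k h1 h2
    have hk : k < h := by
      simp only [List.length_map, List.length_zip, List.length_drop, List.length_take] at h1
      omega
    have hk2 : h + k < hs.length := by omega
    simp only [List.getElem_map, List.getElem_zip, List.getElem_drop, List.getElem_take,
      PySem.List.getElem_pyRange_one, zero_add]
    have e1 : ((k : Int) + (h : Int)) = ((k + h : Nat) : Int) := by push_cast; ring
    rw [e1, PySem.List.pyGet?_natCast, PySem.List.pyGet?_natCast,
      List.getElem?_eq_getElem (by omega), List.getElem?_eq_getElem (by omega)]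
    simp only [Option.getD_some]
    congr 2
    omega

-- ===== VERDICT (by name: the statement is the Claim_ definition above) =====
theorem solution_spec : Claim_equal_solution := by
  intro heights _ hpre
  unfold Spec_solution solution solution_alt
  simp only [PySem.List.foldl_append_singleton_eq_map, List.nil_append]
  set hs := PySem.List.sorted heights (fun x => x) false with hhs
  have hlen : hs.length = heights.length := PySem.List.length_sorted _ _ _
  have hfd : PySem.Int.floordiv (hs.length : Int) 2 = ((hs.length / 2 : Nat) : Int) := by
    exact_mod_cast PySem.Int.floordiv_natCast hs.length 2
  have hmd : PySem.Int.mod (hs.length : Int) 2 = ((hs.length % 2 : Nat) : Int) := by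
    exact_mod_cast PySem.Int.mod_natCast hs.length 2
  set h : Nat := hs.length / 2 with hh
  have hds := diffs_eq hs h (by omega)
  have hlo : PySem.List.slice hs none (some (h : Int)) = hs.take h :=
    PySem.List.slice_to_natCast hs h
  have hhi : PySem.List.slice hs (some (h : Int)) none = hs.drop h :=
    PySem.List.slice_from_natCast hs h
  rcases Nat.mod_two_eq_zero_or_one hs.length with hp | hp
  · -- even length: r = 1, answer sorted(ds)[0]
    have hmd0 : PySem.Int.mod (hs.length : Int) 2 = 0 := by rw [hmd, hp]; simp
    rw [if_neg (by rw [hmd0]; norm_num)]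
    rw [hmd0, hfd, hlo, hhi, if_neg (by norm_num)]
    norm_num
    have hfb := foldl_bounded_pairs ((hs.drop h).zip (hs.take h)) 1
    norm_num at hfb
    rw [hfb, hds]
    rw [show (0 : Int) = ((0 : Nat) : Int) by norm_num,
      PySem.List.pyGet?_natCast, PySem.List.pyGet?_natCast,
      List.getElem?_take_of_lt (by norm_num)]
  · -- odd length: r = 2, answer sorted(ds ++ [extra])[1]
    have hmd1 : PySem.Int.mod (hs.length : Int) 2 = 1 := by rw [hmd, hp]; simp
    have hlt : h < hs.length := by omega
    rw [if_pos hmd1, hmd1, hfd, hlo, hhi, if_pos (by norm_num)]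
    have hx1 : PySem.List.pyGet? (hs.drop h) (-1) = PySem.List.pyGet? hs (-1) := by
      simp only [PySem.List.pyGet?, PySem.List.pyIdx?]
      norm_num
      rw [if_pos (by omega), if_pos (by omega)]
      simp only [Option.bind_some]
      congr 1
      omega
    have hx2 : PySem.List.pyGet? (hs.drop h) 0 = PySem.List.pyGet? hs (h : Int) := by
      rw [show (0 : Int) = ((0 : Nat) : Int) by norm_num,
        PySem.List.pyGet?_natCast, PySem.List.pyGet?_natCast, List.getElem?_drop]
      simp
    rw [hx1, hx2]
    norm_num
    have hfb := foldl_bounded_pairs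
      ((hs.drop h).zip (hs.take h) ++
        [((PySem.List.pyGet? hs (-1)).getD 0, (PySem.List.pyGet? hs (h : Int)).getD 0)]) 2
    norm_num at hfb
    rw [hfb, hds]
    rw [show (1 : Int) = ((1 : Nat) : Int) by norm_num,
      PySem.List.pyGet?_natCast, PySem.List.pyGet?_natCast,
      List.getElem?_take_of_lt (by norm_num)]
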